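-- pv_equiv track=rewrite | github.com/gradgrind/WZ3 | wz/ui/modules/timetable_editor.py | simplify_room_lists
-- ===== SOURCE A (Python) =====
-- def simplify_room_lists(roomlists):
--     """Simplify room lists, check for room conflicts."""
--     # Collect single room "choices" and remove redundant entries
--     singles = set()
--     while True:
--         extra = False
--         singles1 = set()
--         roomlists1 = []
--         for rl in roomlists:
--             rl1 = [r for r in rl if r not in singles]
--             if rl1:
--                 if len(rl1) == 1:
--                     if rl1[0] == '+':
--                         if not extra:
--                             roomlists1.append(rl1)
--                             extra = True
--                     else:
--                         singles1.add(rl1[0])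
--                 else:
--                     roomlists1.append(rl1)
--             else:
--                 raise ValueError
--         if roomlists1 == roomlists:
--             return [[s] for s in sorted(singles)] + roomlists
--         singles.update(singles1)
--         roomlists = roomlists1
-- ===== SOURCE B (Python) =====
-- def _closure(singles, roomlists):
--     """Grow the forced-singles set to its closure; the room lists are never rebuilt."""
--     singles = set(singles)
--     while True:
--         new = set()
--         for rl in roomlists:
--             rl1 = [r for r in rl if r not in singles]
--             if len(rl1) == 1 and rl1[0] != '+':
--                 new.add(rl1[0])
--         if not new:
--             return singles
--         singles |= new
--
--
-- def _assemble(singles, roomlists):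
--     """One final pass building the answer from the closed singles set."""
--     out = [[s] for s in sorted(singles)]
--     plus_done = False
--     for rl in roomlists:
--         rl1 = [r for r in rl if r not in singles]
--         if len(rl1) > 1:
--             out.append(rl1)
--         elif rl1 == ['+'] and not plus_done:
--             out.append(rl1)
--             plus_done = True
--     return out
--
--
-- def simplify_room_lists(roomlists):
--     """Simplify room lists: close the forced-singles set once, then assemble in one pass."""
--     singles = _closure(set(), roomlists)
--     return _assemble(singles, roomlists)
-- ===== Notes on version B (the rewrite author's own statement) =====
-- stated objective: alternative
-- what changed: A repeatedly rebuilds the whole list-of-lists and compares it to the previous round until a fixpoint; B instead grows only the forced-singles set to its closure (never rebuilding the lists) and then assembles the result in one final pass, keeping the first list that reduces to ['+'].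
import Mathlib
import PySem

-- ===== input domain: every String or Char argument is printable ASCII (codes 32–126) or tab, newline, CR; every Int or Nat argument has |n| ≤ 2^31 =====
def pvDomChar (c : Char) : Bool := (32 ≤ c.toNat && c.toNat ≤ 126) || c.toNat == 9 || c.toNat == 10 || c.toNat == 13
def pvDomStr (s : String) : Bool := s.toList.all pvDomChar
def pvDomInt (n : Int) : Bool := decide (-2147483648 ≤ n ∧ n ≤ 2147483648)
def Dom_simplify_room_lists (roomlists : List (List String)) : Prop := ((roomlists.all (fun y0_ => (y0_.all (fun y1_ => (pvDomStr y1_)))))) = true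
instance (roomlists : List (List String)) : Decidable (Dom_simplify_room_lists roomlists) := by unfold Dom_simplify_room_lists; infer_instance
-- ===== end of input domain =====

-- B replaces A's rebuild-and-compare fixpoint over the whole list-of-lists by a set-only closure of the
-- forced singles plus one final assembly pass (alternative decomposition, same asymptotic cost).
-- Pre_ excludes exactly the inputs on which Python A raises ValueError (a room conflict); A's port returns [] there.
-- Python's str '<' equals Lean's String '<' (code-point lexicographic), so sorted uses the identity key


-- ===== PORT A =====

-- [r for r in rl if r not in singles]  (used by both Pythons verbatim)
def resid (S : List String) (rl : List String) : List String :=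
  rl.filter (fun r => !(PySem.Set.contains S r))

def totalLen (rls : List (List String)) : Nat := rls.flatten.length

-- one round of A's 'for rl in roomlists' loop; none = the 'raise ValueError' branch
def stepA (S : PySem.Set String) :
    List (List String) → Bool → PySem.Set String →
    Option (PySem.Set String × List (List String))
  | [], _, s1 => some (s1, [])
  | rl :: rest, extra, s1 =>
    match resid S rl with
    | [] => none
    | [r] =>
      if r = "+" then
        if extra then stepA S rest true s1
        else (stepA S rest true s1).map (fun p => (p.1, [r] :: p.2))
      else stepA S rest extra (PySem.Set.add s1 r)
    | r :: r2 :: t => (stepA S rest extra s1).map (fun p => (p.1, (r :: r2 :: t) :: p.2))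

-- Python's 'while True' loop; the Nat argument is a fuel bound on the number of rounds,
-- proven sufficient (each non-fixpoint round strictly shrinks totalLen, see stepA_size / loopA_eq).
def loopA : Nat → PySem.Set String → List (List String) → Option (List (List String))
  | 0, _, _ => none
  | fuel + 1, S, rls =>
    match stepA S rls false PySem.Set.empty with
    | none => none
    | some (s1, rls1) =>
      if rls1 = rls then
        some (((PySem.List.sorted S (fun s => s) false).map (fun s => [s])) ++ rls)
      else loopA fuel (PySem.Set.update S s1) rls1

-- A raises ValueError exactly when loopA returns none (outside Pre_); the port returns [] there.
def simplify_room_lists (roomlists : List (List String)) : List (List String) :=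
  (loopA (totalLen roomlists + 1) PySem.Set.empty roomlists).getD []

-- ===== PORT B =====

-- the body of B's closure round: the set 'new' built by the for-loop
def newB (S : PySem.Set String) (rls : List (List String)) : PySem.Set String :=
  rls.foldl (fun acc rl =>
    match resid S rl with
    | [r] => if r = "+" then acc else PySem.Set.add acc r
    | _ => acc) PySem.Set.empty

-- B's 'while True' closure loop; fuel bound on iterations, proven sufficient
-- (each iteration adds at least one room of the input to the singles set).
def closureB : Nat → PySem.Set String → List (List String) → PySem.Set String
  | 0, S, _ => S
  | fuel + 1, S, rls =>
    if newB S rls = [] then S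
    else closureB fuel (PySem.Set.union S (newB S rls)) rls

-- B's final 'for rl in roomlists' pass
def assembleGo (S : PySem.Set String) : List (List String) → Bool → List (List String)
  | [], _ => []
  | rl :: rest, plusDone =>
    let rl1 := resid S rl
    if 1 < rl1.length then rl1 :: assembleGo S rest plusDone
    else if rl1 = ["+"] ∧ plusDone = false then rl1 :: assembleGo S rest true
    else assembleGo S rest plusDone

def assembleB (S : PySem.Set String) (rls : List (List String)) : List (List String) :=
  ((PySem.List.sorted S (fun s => s) false).map (fun s => [s])) ++ assembleGo S rls false

def simplify_room_lists_alt (roomlists : List (List String)) : List (List String) :=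
  assembleB (closureB (roomlists.flatten.length + 1) PySem.Set.empty roomlists) roomlists

-- ===== PRECONDITION & SPEC =====

def pvResid (S : List String) (rl : List String) : List String :=
  rl.filter (fun r => decide (r ∉ S))

def pvForced (rls : List (List String)) (S : List String) : List String :=
  rls.filterMap (fun rl =>
    match pvResid S rl with
    | [r] => if r = "+" then none else some r
    | _ => none)

-- the k-th stage of the forced-singles closure (unit propagation), from the input alone
def pvStage (rls : List (List String)) : Nat → List String
  | 0 => []
  | k + 1 => pvStage rls k ++ pvForced rls (pvStage rls k)

-- Pre_ excludes exactly the inputs on which the Python A raises ValueError (a room conflict):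
-- an empty choice list, or a list emptied by unit propagation while it still held ≥ 2 rooms.
def Pre_simplify_room_lists (roomlists : List (List String)) : Prop :=
  (∀ rl ∈ roomlists, rl ≠ []) ∧
  ∀ rl ∈ roomlists, ∀ k ≤ roomlists.flatten.length,
    ¬(2 ≤ (pvResid (pvStage roomlists k) rl).length ∧
      pvResid (pvStage roomlists (k + 1)) rl = [])

instance (roomlists : List (List String)) : Decidable (Pre_simplify_room_lists roomlists) := by
  unfold Pre_simplify_room_lists; infer_instance

def pvWitness_simplify_room_lists : List (List String) := [["a"], ["b", "c"]]

def Spec_simplify_room_lists (roomlists : List (List String)) (out : List (List String)) : Prop :=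
  out = simplify_room_lists_alt roomlists

instance (roomlists : List (List String)) (out : List (List String)) :
    Decidable (Spec_simplify_room_lists roomlists out) := by
  unfold Spec_simplify_room_lists; infer_instance

-- ===== CLAIM (what is proved, stated in full; the proofs are below) =====

def Claim_equal_simplify_room_lists : Prop :=
  ∀ (roomlists : List (List String)), Dom_simplify_room_lists roomlists →
    Pre_simplify_room_lists roomlists →
    Spec_simplify_room_lists roomlists (simplify_room_lists roomlists)

-- ===== LEMMAS AND PROOFS =====

theorem totalLen_cons (rl : List String) (rest : List (List String)) :
    totalLen (rl :: rest) = rl.length + totalLen rest := by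
  simp [totalLen]

theorem resid_sub (S : List String) (rl : List String) :
    resid S rl = rl ∨ (resid S rl).length < rl.length := by
  have hs : List.Sublist (resid S rl) rl := List.filter_sublist
  rcases eq_or_lt_of_le hs.length_le with h | h
  · exact Or.inl (hs.eq_of_length h)
  · exact Or.inr h

-- needed by loopA's fuel bound: a non-fixpoint round strictly shrinks totalLen
theorem stepA_size (S : PySem.Set String) :
    ∀ (l : List (List String)) (extra : Bool) (s1 s' : PySem.Set String)
      (out : List (List String)),
      stepA S l extra s1 = some (s', out) →
      totalLen out ≤ totalLen l ∧ (out = l ∨ totalLen out < totalLen l) := by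
  intro l
  induction l with
  | nil =>
    intro extra s1 s' out h
    simp [stepA] at h
    simp [h.2.symm]
  | cons rl rest ih =>
    intro extra s1 s' out h
    have hlen : (resid S rl).length ≤ rl.length :=
      (List.filter_sublist (p := fun r => !(PySem.Set.contains S r)) (l := rl)).length_le
    cases hfil : resid S rl with
    | nil => simp [stepA, hfil] at h
    | cons r rs =>
      have hrl : 1 ≤ rl.length := by rw [hfil] at hlen; simp at hlen; omega
      cases rs with
      | nil =>
        by_cases hr : r = "+"
        · subst hr
          cases extra with
          | true =>
            simp only [stepA, hfil, if_pos] at h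
            obtain ⟨h1, _⟩ := ih true s1 s' out h
            rw [totalLen_cons]
            constructor
            · omega
            · right; omega
          | false =>
            simp only [stepA, hfil, if_pos, Bool.false_eq_true, if_false] at h
            cases hstep : stepA S rest true s1 with
            | none => rw [hstep] at h; simp at h
            | some p =>
              rw [hstep] at h; simp at h
              obtain ⟨rfl, rfl⟩ := h
              obtain ⟨h1, h2 | h2⟩ := ih true s1 p.1 p.2 hstep
              · rcases resid_sub S rl with he | hlt
                · rw [hfil] at he
                  refine ⟨?_, Or.inl ?_⟩
                  · rw [totalLen_cons, h2, totalLen_cons, ← he]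
                  · rw [h2, ← he]
                · rw [hfil] at hlt; simp at hlt
                  rw [totalLen_cons, totalLen_cons, h2]
                  refine ⟨by simp; omega, Or.inr (by simp; omega)⟩
              · rw [totalLen_cons, totalLen_cons]
                refine ⟨by simp; omega, Or.inr (by simp; omega)⟩
        · simp only [stepA, hfil, if_neg hr] at h
          obtain ⟨h1, _⟩ := ih extra (PySem.Set.add s1 r) s' out h
          rw [totalLen_cons]
          exact ⟨by omega, Or.inr (by omega)⟩
      | cons r2 t =>
        simp only [stepA, hfil] at h
        cases hstep : stepA S rest extra s1 with
        | none => rw [hstep] at h; simp at h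
        | some p =>
          rw [hstep] at h; simp at h
          obtain ⟨rfl, rfl⟩ := h
          have hlen2 : (r :: r2 :: t).length ≤ rl.length := by rw [← hfil]; exact hlen
          obtain ⟨h1, h2 | h2⟩ := ih extra s1 p.1 p.2 hstep
          · rcases resid_sub S rl with he | hlt
            · rw [hfil] at he
              refine ⟨?_, Or.inl ?_⟩
              · rw [totalLen_cons, h2, totalLen_cons, ← he]
              · rw [h2, ← he]
            · rw [hfil] at hlt
              rw [totalLen_cons, totalLen_cons, h2]
              exact ⟨by simp at hlt ⊢; omega, Or.inr (by simp at hlt ⊢; omega)⟩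
          · rw [totalLen_cons, totalLen_cons]
            exact ⟨by simp at hlen2 ⊢; omega, Or.inr (by simp at hlen2 ⊢; omega)⟩


theorem resid_congr {S S' : List String} (h : ∀ x, x ∈ S ↔ x ∈ S') (rl : List String) :
    resid S rl = resid S' rl := by
  unfold resid
  apply List.filter_congr
  intro r _
  by_cases hr : r ∈ S
  · have hr' := (h r).mp hr
    simp [hr, hr']
  · have hr' : r ∉ S' := fun hx => hr ((h r).mpr hx)
    simp [hr, hr']

theorem resid_resid {S U : List String} (hsub : ∀ x, x ∈ S → x ∈ U) (rl : List String) :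
    resid U (resid S rl) = resid U rl := by
  unfold resid
  rw [List.filter_filter]
  apply List.filter_congr
  intro r _
  by_cases hU : r ∈ U
  · simp [hU]
  · have hS : r ∉ S := fun hx => hU (hsub _ hx)
    simp [hU, hS]

theorem resid_empty (rl : List String) : resid PySem.Set.empty rl = rl := by
  unfold resid
  rw [List.filter_eq_self]
  intro a _
  simp [PySem.Set.empty]

theorem resid_single_plus {S : List String} (h : ("+" : String) ∉ S) :
    resid S ["+"] = ["+"] := by
  unfold resid
  simp [h]

theorem resid_single_mem {S : List String} {r : String} (h : r ∈ S) :
    resid S [r] = [] := by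
  unfold resid
  simp [h]

theorem mem_resid (S rl : List String) (x : String) :
    x ∈ resid S rl ↔ x ∈ rl ∧ x ∉ S := by
  simp [resid]

-- characterization of one round of A: the collected singles and the surviving lists
theorem stepA_char (S : PySem.Set String) :
    ∀ (l : List (List String)) (extra : Bool) (s1 s' : PySem.Set String)
      (out : List (List String)),
      stepA S l extra s1 = some (s', out) →
      (∀ x, x ∈ s' ↔ (x ∈ s1 ∨ (x ≠ "+" ∧ ∃ rl ∈ l, resid S rl = [x]))) ∧
      (∀ rl1 ∈ out, (2 ≤ rl1.length ∨ rl1 = ["+"]) ∧ ∃ rl ∈ l, rl1 = resid S rl) ∧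
      (∀ rl ∈ l, resid S rl ∈ out ∨ ∃ r, resid S rl = [r]) := by
  intro l
  induction l with
  | nil =>
    intro extra s1 s' out h
    simp [stepA] at h
    obtain ⟨h1, h2⟩ := h
    subst h1; subst h2
    refine ⟨by simp, by simp, by simp⟩
  | cons rl rest ih =>
    intro extra s1 s' out h
    cases hfil : resid S rl with
    | nil => simp [stepA, hfil] at h
    | cons r rs =>
      cases rs with
      | nil =>
        by_cases hr : r = "+"
        · subst hr
          cases extra with
          | true =>
            simp only [stepA, hfil, if_pos] at h
            obtain ⟨ih1, ih2, ih3⟩ := ih true s1 s' out h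
            refine ⟨?_, ?_, ?_⟩
            · intro x
              rw [ih1]
              constructor
              · rintro (hx | ⟨hx, rl', hm, hres⟩)
                · exact Or.inl hx
                · exact Or.inr ⟨hx, rl', List.mem_cons_of_mem _ hm, hres⟩
              · rintro (hx | ⟨hx, rl', hm, hres⟩)
                · exact Or.inl hx
                · rcases List.mem_cons.mp hm with rfl | hm
                  · rw [hfil] at hres; simp at hres; exact absurd hres.symm hx
                  · exact Or.inr ⟨hx, rl', hm, hres⟩
            · intro rl1 hm
              obtain ⟨hshape, rl', hm', hres⟩ := ih2 rl1 hm
              exact ⟨hshape, rl', List.mem_cons_of_mem _ hm', hres⟩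
            · intro rl' hm
              rcases List.mem_cons.mp hm with rfl | hm
              · exact Or.inr ⟨"+", hfil⟩
              · exact ih3 rl' hm
          | false =>
            simp only [stepA, hfil, if_pos, Bool.false_eq_true, if_false] at h
            cases hstep : stepA S rest true s1 with
            | none => rw [hstep] at h; simp at h
            | some p =>
              rw [hstep] at h; simp at h
              obtain ⟨rfl, rfl⟩ := h
              obtain ⟨ih1, ih2, ih3⟩ := ih true s1 p.1 p.2 hstep
              refine ⟨?_, ?_, ?_⟩
              · intro x
                rw [ih1]
                constructor
                · rintro (hx | ⟨hx, rl', hm, hres⟩)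
                  · exact Or.inl hx
                  · exact Or.inr ⟨hx, rl', List.mem_cons_of_mem _ hm, hres⟩
                · rintro (hx | ⟨hx, rl', hm, hres⟩)
                  · exact Or.inl hx
                  · rcases List.mem_cons.mp hm with rfl | hm
                    · rw [hfil] at hres; simp at hres; exact absurd hres.symm hx
                    · exact Or.inr ⟨hx, rl', hm, hres⟩
              · intro rl1 hm
                rcases List.mem_cons.mp hm with rfl | hm
                · exact ⟨Or.inr rfl, rl, List.mem_cons_self, hfil.symm⟩
                · obtain ⟨hshape, rl', hm', hres⟩ := ih2 rl1 hm
                  exact ⟨hshape, rl', List.mem_cons_of_mem _ hm', hres⟩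
              · intro rl' hm
                rcases List.mem_cons.mp hm with rfl | hm
                · exact Or.inl (by rw [hfil]; exact List.mem_cons_self)
                · rcases ih3 rl' hm with hin | hex
                  · exact Or.inl (List.mem_cons_of_mem _ hin)
                  · exact Or.inr hex
        · simp only [stepA, hfil, if_neg hr] at h
          obtain ⟨ih1, ih2, ih3⟩ := ih extra (PySem.Set.add s1 r) s' out h
          refine ⟨?_, ?_, ?_⟩
          · intro x
            rw [ih1]
            constructor
            · rintro (hx | ⟨hx, rl', hm, hres⟩)
              · rcases (PySem.Set.mem_add s1 r x).mp hx with hx | rfl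
                · exact Or.inl hx
                · exact Or.inr ⟨hr, rl, List.mem_cons_self, hfil⟩
              · exact Or.inr ⟨hx, rl', List.mem_cons_of_mem _ hm, hres⟩
            · rintro (hx | ⟨hx, rl', hm, hres⟩)
              · exact Or.inl ((PySem.Set.mem_add s1 r x).mpr (Or.inl hx))
              · rcases List.mem_cons.mp hm with rfl | hm
                · rw [hfil] at hres; simp at hres
                  exact Or.inl ((PySem.Set.mem_add s1 r x).mpr (Or.inr hres.symm))
                · exact Or.inr ⟨hx, rl', hm, hres⟩
          · intro rl1 hm
            obtain ⟨hshape, rl', hm', hres⟩ := ih2 rl1 hm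
            exact ⟨hshape, rl', List.mem_cons_of_mem _ hm', hres⟩
          · intro rl' hm
            rcases List.mem_cons.mp hm with rfl | hm
            · exact Or.inr ⟨r, hfil⟩
            · exact ih3 rl' hm
      | cons r2 t =>
        simp only [stepA, hfil] at h
        cases hstep : stepA S rest extra s1 with
        | none => rw [hstep] at h; simp at h
        | some p =>
          rw [hstep] at h; simp at h
          obtain ⟨rfl, rfl⟩ := h
          obtain ⟨ih1, ih2, ih3⟩ := ih extra s1 p.1 p.2 hstep
          refine ⟨?_, ?_, ?_⟩
          · intro x
            rw [ih1]
            constructor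
            · rintro (hx | ⟨hx, rl', hm, hres⟩)
              · exact Or.inl hx
              · exact Or.inr ⟨hx, rl', List.mem_cons_of_mem _ hm, hres⟩
            · rintro (hx | ⟨hx, rl', hm, hres⟩)
              · exact Or.inl hx
              · rcases List.mem_cons.mp hm with rfl | hm
                · rw [hfil] at hres; simp at hres
                · exact Or.inr ⟨hx, rl', hm, hres⟩
          · intro rl1 hm
            rcases List.mem_cons.mp hm with rfl | hm
            · exact ⟨Or.inl (by simp), rl, List.mem_cons_self, hfil.symm⟩
            · obtain ⟨hshape, rl', hm', hres⟩ := ih2 rl1 hm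
              exact ⟨hshape, rl', List.mem_cons_of_mem _ hm', hres⟩
          · intro rl' hm
            rcases List.mem_cons.mp hm with rfl | hm
            · exact Or.inl (by rw [hfil]; exact List.mem_cons_self)
            · rcases ih3 rl' hm with hin | hex
              · exact Or.inl (List.mem_cons_of_mem _ hin)
              · exact Or.inr hex

-- a fixpoint round: every list is its own residual, no forced single remains,
-- and B's assembly pass returns the lists unchanged
theorem stepA_fix (S : PySem.Set String) :
    ∀ (l : List (List String)) (extra : Bool) (s1 s' : PySem.Set String),
      stepA S l extra s1 = some (s', l) →
      (∀ rl ∈ l, resid S rl = rl) ∧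
      (∀ rl ∈ l, ∀ r, resid S rl = [r] → r = "+") ∧
      assembleGo S l extra = l := by
  intro l
  induction l with
  | nil => intro extra s1 s' _; exact ⟨by simp, by simp, by simp [assembleGo]⟩
  | cons rl rest ih =>
    intro extra s1 s' h
    cases hfil : resid S rl with
    | nil => simp [stepA, hfil] at h
    | cons r rs =>
      have hlen : (resid S rl).length ≤ rl.length :=
        (List.filter_sublist (p := fun r => !(PySem.Set.contains S r)) (l := rl)).length_le
      have hrl : 1 ≤ rl.length := by rw [hfil] at hlen; simp at hlen; omega
      cases rs with
      | nil =>
        by_cases hr : r = "+"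
        · subst hr
          cases extra with
          | true =>
            simp only [stepA, hfil, if_pos] at h
            have := (stepA_size S rest true s1 s' (rl :: rest) h).1
            rw [totalLen_cons] at this; omega
          | false =>
            simp only [stepA, hfil, if_pos, Bool.false_eq_true, if_false] at h
            cases hstep : stepA S rest true s1 with
            | none => rw [hstep] at h; simp at h
            | some p =>
              rw [hstep] at h; simp at h
              obtain ⟨h1, h2, h3⟩ := h
              subst h1
              obtain ⟨f1, f2, f3⟩ := ih true s1 p.1
                (show stepA S rest true s1 = some (p.1, rest) by rw [hstep, ← h3])
              refine ⟨?_, ?_, ?_⟩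
              · intro rl' hm
                rcases List.mem_cons.mp hm with rfl | hm
                · rw [hfil, h2]
                · exact f1 rl' hm
              · intro rl' hm r' hres
                rcases List.mem_cons.mp hm with rfl | hm
                · rw [hfil] at hres; simp at hres; exact hres.symm
                · exact f2 rl' hm r' hres
              · simp only [assembleGo]
                rw [hfil, if_neg (by simp), if_pos (by simp), f3, ← h2]
        · simp only [stepA, hfil, if_neg hr] at h
          have := (stepA_size S rest extra (PySem.Set.add s1 r) s' (rl :: rest) h).1
          rw [totalLen_cons] at this; omega
      | cons r2 t =>
        simp only [stepA, hfil] at h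
        cases hstep : stepA S rest extra s1 with
        | none => rw [hstep] at h; simp at h
        | some p =>
          rw [hstep] at h; simp at h
          obtain ⟨h1, h2, h3⟩ := h
          subst h1
          obtain ⟨f1, f2, f3⟩ := ih extra s1 p.1
            (show stepA S rest extra s1 = some (p.1, rest) by rw [hstep, ← h3])
          refine ⟨?_, ?_, ?_⟩
          · intro rl' hm
            rcases List.mem_cons.mp hm with rfl | hm
            · rw [hfil, h2]
            · exact f1 rl' hm
          · intro rl' hm r' hres
            rcases List.mem_cons.mp hm with rfl | hm
            · rw [hfil] at hres; simp at hres
            · exact f2 rl' hm r' hres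
          · simp only [assembleGo]
            rw [hfil, if_pos (by simp), f3, h2]

theorem newB_eq_nil_aux (S : PySem.Set String) :
    ∀ (l : List (List String)) (acc : PySem.Set String),
      (∀ rl ∈ l, ∀ r, resid S rl = [r] → r = "+") →
      l.foldl (fun acc rl =>
        match resid S rl with
        | [r] => if r = "+" then acc else PySem.Set.add acc r
        | _ => acc) acc = acc := by
  intro l
  induction l with
  | nil => intro acc _; simp
  | cons rl rest ih =>
    intro acc h
    simp only [List.foldl_cons]
    cases hfil : resid S rl with
    | nil =>
      simp only []
      exact ih acc (fun rl' hm => h rl' (List.mem_cons_of_mem _ hm))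
    | cons r rs =>
      cases rs with
      | nil =>
        have hr : r = "+" := h rl List.mem_cons_self r hfil
        subst hr
        simp only [if_pos]
        exact ih acc (fun rl' hm => h rl' (List.mem_cons_of_mem _ hm))
      | cons r2 t =>
        simp only []
        exact ih acc (fun rl' hm => h rl' (List.mem_cons_of_mem _ hm))

theorem newB_eq_nil (S : PySem.Set String) (rls : List (List String))
    (h : ∀ rl ∈ rls, ∀ r, resid S rl = [r] → r = "+") : newB S rls = [] :=
  newB_eq_nil_aux S rls PySem.Set.empty h

theorem mem_newB_aux (S : PySem.Set String) :
    ∀ (l : List (List String)) (acc : PySem.Set String) (x : String),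
      x ∈ l.foldl (fun acc rl =>
        match resid S rl with
        | [r] => if r = "+" then acc else PySem.Set.add acc r
        | _ => acc) acc ↔
      x ∈ acc ∨ (x ≠ "+" ∧ ∃ rl ∈ l, resid S rl = [x]) := by
  intro l
  induction l with
  | nil => intro acc x; simp
  | cons rl rest ih =>
    intro acc x
    simp only [List.foldl_cons]
    have hstep : ∀ acc' : PySem.Set String,
        (x ∈ (match resid S rl with
          | [r] => if r = "+" then acc' else PySem.Set.add acc' r
          | _ => acc') ↔ x ∈ acc' ∨ (x ≠ "+" ∧ resid S rl = [x])) := by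
      intro acc'
      cases hfil : resid S rl with
      | nil =>
        simp only []
        constructor
        · exact Or.inl
        · rintro (h | ⟨_, h⟩)
          · exact h
          · simp at h
      | cons r rs =>
        cases rs with
        | nil =>
          by_cases hr : r = "+"
          · subst hr
            simp only [if_pos]
            constructor
            · exact Or.inl
            · rintro (h | ⟨hx, h⟩)
              · exact h
              · simp at h; exact absurd h.symm hx
          · simp only [if_neg hr, PySem.Set.mem_add]
            constructor
            · rintro (h | rfl)
              · exact Or.inl h
              · exact Or.inr ⟨hr, rfl⟩
            · rintro (h | ⟨hx, h⟩)
              · exact Or.inl h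
              · simp at h; exact Or.inr h.symm
        | cons r2 t =>
          simp only []
          constructor
          · exact Or.inl
          · rintro (h | ⟨_, h⟩)
            · exact h
            · simp at h
    rw [ih, hstep acc]
    constructor
    · rintro ((h | ⟨hx, h⟩) | ⟨hx, rl', h1, h2⟩)
      · exact Or.inl h
      · exact Or.inr ⟨hx, rl, List.mem_cons_self, h⟩
      · exact Or.inr ⟨hx, rl', List.mem_cons_of_mem _ h1, h2⟩
    · rintro (h | ⟨hx, rl', h1, h2⟩)
      · exact Or.inl (Or.inl h)
      · rcases List.mem_cons.mp h1 with rfl | h1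
        · exact Or.inl (Or.inr ⟨hx, h2⟩)
        · exact Or.inr ⟨hx, rl', h1, h2⟩

theorem mem_newB (S : PySem.Set String) (rls : List (List String)) (x : String) :
    x ∈ newB S rls ↔ x ≠ "+" ∧ ∃ rl ∈ rls, resid S rl = [x] := by
  rw [newB, mem_newB_aux]
  simp [PySem.Set.empty]

theorem newB_congr {U U' : List String} (h : ∀ x, x ∈ U ↔ x ∈ U') (l : List (List String)) :
    newB U l = newB U' l := by
  unfold newB
  have hfun : (fun (acc : PySem.Set String) rl =>
      match resid U rl with
      | [r] => if r = "+" then acc else PySem.Set.add acc r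
      | _ => acc) =
      (fun (acc : PySem.Set String) rl =>
      match resid U' rl with
      | [r] => if r = "+" then acc else PySem.Set.add acc r
      | _ => acc) := by
    funext acc rl
    rw [resid_congr h rl]
  rw [hfun]

-- closure basics (any fuel)
theorem closure_sub : ∀ (fuel : Nat) (S : PySem.Set String) (rls : List (List String)) (x : String),
    x ∈ S → x ∈ closureB fuel S rls := by
  intro fuel
  induction fuel with
  | zero => intro S rls x hx; simpa [closureB] using hx
  | succ n ih =>
    intro S rls x hx
    simp only [closureB]
    by_cases h : newB S rls = []
    · rw [if_pos h]; exact hx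
    · rw [if_neg h]
      exact ih _ rls x (by rw [PySem.Set.mem_union]; exact Or.inl hx)

theorem closure_plus_free : ∀ (fuel : Nat) (S : PySem.Set String) (rls : List (List String)),
    ("+" : String) ∉ S → ("+" : String) ∉ closureB fuel S rls := by
  intro fuel
  induction fuel with
  | zero => intro S rls h; simpa [closureB] using h
  | succ n ih =>
    intro S rls h
    simp only [closureB]
    by_cases hB : newB S rls = []
    · rw [if_pos hB]; exact h
    · rw [if_neg hB]
      apply ih
      rw [PySem.Set.mem_union]
      rintro (hc | hc)
      · exact h hc
      · exact ((mem_newB S rls _).mp hc).1 rfl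

theorem closure_nodup : ∀ (fuel : Nat) (S : PySem.Set String) (rls : List (List String)),
    S.Nodup → (closureB fuel S rls).Nodup := by
  intro fuel
  induction fuel with
  | zero => intro S rls h; simpa [closureB] using h
  | succ n ih =>
    intro S rls h
    simp only [closureB]
    by_cases hB : newB S rls = []
    · rw [if_pos hB]; exact h
    · rw [if_neg hB]
      exact ih _ rls (PySem.Set.nodup_union S (newB S rls) h)

theorem closure_new_sub (fuel : Nat) (S : PySem.Set String) (rls : List (List String)) :
    ∀ x ∈ newB S rls, x ∈ closureB (fuel + 1) S rls := by
  intro x hx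
  simp only [closureB]
  rw [if_neg (List.ne_nil_of_mem hx)]
  exact closure_sub fuel _ rls x (by rw [PySem.Set.mem_union]; exact Or.inr hx)

-- fuel bounds are always sufficient: the measure is at most the number of rooms
theorem measure_le (T : List String) (l : List (List String)) :
    (l.flatten.filter (fun r => !(PySem.Set.contains T r))).length < l.flatten.length + 1 :=
  Nat.lt_succ_of_le (List.length_filter_le _ _)


theorem length_filter_lt (l S S' : List String) (hsub : ∀ x, x ∈ S → x ∈ S')
    (r : String) (hr : r ∈ l) (hrS : r ∉ S) (hrS' : r ∈ S') :
    (l.filter (fun x => !(PySem.Set.contains S' x))).length <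
      (l.filter (fun x => !(PySem.Set.contains S x))).length := by
  have hpq : ∀ x : String, (fun x => !(PySem.Set.contains S' x)) x = true →
      (fun x => !(PySem.Set.contains S x)) x = true := by
    intro x hx
    simp at hx ⊢
    exact fun hxS => hx (hsub x hxS)
  have hsubl : List.Sublist (l.filter (fun x => !(PySem.Set.contains S' x)))
      (l.filter (fun x => !(PySem.Set.contains S x))) :=
    List.monotone_filter_right l hpq
  rcases eq_or_lt_of_le hsubl.length_le with h | h
  · exfalso
    have heq := hsubl.eq_of_length h
    have hmem : r ∈ l.filter (fun x => !(PySem.Set.contains S x)) := by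
      simp [List.mem_filter]
      exact ⟨hr, hrS⟩
    rw [← heq] at hmem
    simp [List.mem_filter] at hmem
    exact hmem.2 hrS'
  · exact h


-- the closure computes the same set of rooms from mem-equal starts and
-- round-equivalent list arguments
theorem closure_congr : ∀ (fA : Nat) (T T' : PySem.Set String)
    (lA lB : List (List String)) (fB : Nat),
    (lA.flatten.filter (fun r => !(PySem.Set.contains T r))).length < fA →
    (lB.flatten.filter (fun r => !(PySem.Set.contains T' r))).length < fB →
    (∀ x, x ∈ T ↔ x ∈ T') → ("+" : String) ∉ T →
    (∀ U : List String, (∀ x, x ∈ T → x ∈ U) → ("+" : String) ∉ U →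
      ∀ r, r ∈ newB U lB ↔ r ∈ newB U lA) →
    ∀ x, x ∈ closureB fA T lA ↔ x ∈ closureB fB T' lB := by
  intro fA
  induction fA with
  | zero => intro T T' lA lB fB hfA; omega
  | succ n ih =>
    intro T T' lA lB fB hfA hfB hT hplus H x
    cases fB with
    | zero => omega
    | succ m =>
      have hBB' : newB T' lB = newB T lB := newB_congr (fun y => (hT y).symm) lB
      have hBA : ∀ r, r ∈ newB T' lB ↔ r ∈ newB T lA := by
        intro r; rw [hBB']; exact H T (fun _ hy => hy) hplus r
      by_cases hA : newB T lA = []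
      · have hB : newB T' lB = [] := by
          rw [List.eq_nil_iff_forall_not_mem]
          intro r hr
          have := (hBA r).mp hr
          rw [hA] at this
          simp at this
        simp only [closureB]
        rw [if_pos hA, if_pos hB]
        exact hT x
      · have hBne : newB T' lB ≠ [] := by
          obtain ⟨r, hr⟩ := List.exists_mem_of_ne_nil _ hA
          exact List.ne_nil_of_mem ((hBA r).mpr hr)
        simp only [closureB]
        rw [if_neg hA, if_neg hBne]
        have hTT : ∀ y, y ∈ PySem.Set.union T (newB T lA) ↔
            y ∈ PySem.Set.union T' (newB T' lB) := by
          intro y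
          rw [PySem.Set.mem_union, PySem.Set.mem_union]
          constructor
          · rintro (hy | hy)
            · exact Or.inl ((hT y).mp hy)
            · exact Or.inr ((hBA y).mpr hy)
          · rintro (hy | hy)
            · exact Or.inl ((hT y).mpr hy)
            · exact Or.inr ((hBA y).mp hy)
        have hplusA : ("+" : String) ∉ PySem.Set.union T (newB T lA) := by
          rw [PySem.Set.mem_union]
          rintro (hc | hc)
          · exact hplus hc
          · exact ((mem_newB T lA _).mp hc).1 rfl
        have HA : ∀ U : List String, (∀ y, y ∈ PySem.Set.union T (newB T lA) → y ∈ U) →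
            ("+" : String) ∉ U → ∀ r, r ∈ newB U lB ↔ r ∈ newB U lA := by
          intro U hU hUp
          exact H U (fun y hy => hU y (by rw [PySem.Set.mem_union]; exact Or.inl hy)) hUp
        have hmA : (lA.flatten.filter
            (fun r => !(PySem.Set.contains (PySem.Set.union T (newB T lA)) r))).length < n := by
          obtain ⟨r, hr⟩ := List.exists_mem_of_ne_nil _ hA
          obtain ⟨hrp, rl, hrl, hres⟩ := (mem_newB T lA r).mp hr
          have hrres : r ∈ resid T rl := by rw [hres]; exact List.mem_cons_self
          rw [mem_resid] at hrres
          have := length_filter_lt lA.flatten T (PySem.Set.union T (newB T lA))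
            (fun y hy => by rw [PySem.Set.mem_union]; exact Or.inl hy)
            r (List.mem_flatten.mpr ⟨rl, hrl, hrres.1⟩) hrres.2
            (by rw [PySem.Set.mem_union]; exact Or.inr hr)
          omega
        have hmB : (lB.flatten.filter
            (fun r => !(PySem.Set.contains (PySem.Set.union T' (newB T' lB)) r))).length < m := by
          obtain ⟨r, hr⟩ := List.exists_mem_of_ne_nil _ hBne
          have hrA := (hBA r).mp hr
          obtain ⟨hrp, _, _, _⟩ := (mem_newB T lA r).mp hrA
          rw [hBB'] at hr
          obtain ⟨_, rl, hrl, hres⟩ := (mem_newB T lB r).mp hr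
          have hrres : r ∈ resid T rl := by rw [hres]; exact List.mem_cons_self
          rw [mem_resid] at hrres
          have hrT' : r ∉ T' := fun hc => hrres.2 ((hT r).mpr hc)
          have := length_filter_lt lB.flatten T' (PySem.Set.union T' (newB T' lB))
            (fun y hy => by rw [PySem.Set.mem_union]; exact Or.inl hy)
            r (List.mem_flatten.mpr ⟨rl, hrl, hrres.1⟩) hrT'
            (by rw [PySem.Set.mem_union]; exact Or.inr (by rw [hBB']; exact hr))
          omega
        exact ih (PySem.Set.union T (newB T lA)) (PySem.Set.union T' (newB T' lB))
          lA lB m hmA hmB hTT hplusA HA x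

-- mem-equal nodup sets sort to the same list
theorem sorted_eq_mem (S S' : List String) (h : ∀ x, x ∈ S ↔ x ∈ S')
    (h1 : S.Nodup) (h2 : S'.Nodup) :
    PySem.List.sorted S (fun s : String => s) false =
      PySem.List.sorted S' (fun s : String => s) false := by
  have hperm : List.Perm S S' := (List.perm_ext_iff_of_nodup h1 h2).mpr h
  have hys : (PySem.List.sorted S (fun s : String => s) false).Perm S :=
    PySem.List.sorted_perm S _ false
  have hple : (PySem.List.sorted S (fun s : String => s) false).Pairwise
      (fun a b : String => a ≤ b) := PySem.List.sorted_pairwise S _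
  have hnd : (PySem.List.sorted S (fun s : String => s) false).Nodup :=
    hys.nodup_iff.mpr h1
  have hplt : (PySem.List.sorted S (fun s : String => s) false).Pairwise
      (fun a b : String => a < b) :=
    (hple.and hnd).imp (fun hx => lt_of_le_of_ne hx.1 hx.2)
  exact (PySem.List.sorted_eq_of_perm_of_pairwise_lt S' _ _ (hys.trans hperm) hplt).symm

theorem assembleGo_congr {S S' : PySem.Set String} (h : ∀ x, x ∈ S ↔ x ∈ S') :
    ∀ (l : List (List String)) (b : Bool), assembleGo S l b = assembleGo S' l b := by
  intro l
  induction l with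
  | nil => intro b; simp [assembleGo]
  | cons rl rest ih =>
    intro b
    simp only [assembleGo]
    rw [resid_congr h rl]
    split_ifs <;> simp [ih]

-- B's assembly pass gives the same answer on a round's input and output lists
theorem step_assemble (S C : PySem.Set String) :
    ∀ (l : List (List String)) (extra : Bool) (s1 s' : PySem.Set String)
      (out : List (List String)),
      stepA S l extra s1 = some (s', out) →
      (∀ x, x ∈ S → x ∈ C) → (∀ x, x ∈ s' → x ∈ C) → ("+" : String) ∉ C →
      ∀ b : Bool, (extra = true → b = true) →
      assembleGo C l b = assembleGo C out b := by
  intro l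
  induction l with
  | nil =>
    intro extra s1 s' out h _ _ _ b _
    simp [stepA] at h
    rw [← h.2]
  | cons rl rest ih =>
    intro extra s1 s' out h hS hs' hC b hb
    cases hfil : resid S rl with
    | nil => simp [stepA, hfil] at h
    | cons r rs =>
      have hresC : resid C rl = resid C (resid S rl) := (resid_resid hS rl).symm
      cases rs with
      | nil =>
        by_cases hr : r = "+"
        · subst hr
          cases extra with
          | true =>
            simp only [stepA, hfil, if_pos] at h
            have hbt : b = true := hb rfl
            subst hbt
            have hCrl : resid C rl = ["+"] := by
              rw [hresC, hfil]; exact resid_single_plus hC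
            simp only [assembleGo]
            rw [hCrl, if_neg (by simp), if_neg (by simp)]
            exact ih true s1 s' out h hS hs' hC true (fun _ => rfl)
          | false =>
            simp only [stepA, hfil, if_pos, Bool.false_eq_true, if_false] at h
            cases hstep : stepA S rest true s1 with
            | none => rw [hstep] at h; simp at h
            | some p =>
              rw [hstep] at h; simp at h
              obtain ⟨rfl, rfl⟩ := h
              have hCrl : resid C rl = ["+"] := by
                rw [hresC, hfil]; exact resid_single_plus hC
              have hCplus : resid C ["+"] = ["+"] := resid_single_plus hC
              cases b with
              | false =>
                simp only [assembleGo]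
                rw [hCrl, hCplus, if_neg (by simp), if_pos (by simp)]
                exact congrArg (_ :: ·) (ih true s1 p.1 p.2 hstep hS hs' hC true (fun _ => rfl))
              | true =>
                simp only [assembleGo]
                rw [hCrl, hCplus, if_neg (by simp), if_neg (by simp)]
                exact ih true s1 p.1 p.2 hstep hS hs' hC true (fun _ => rfl)
        · simp only [stepA, hfil, if_neg hr] at h
          have hrs' : r ∈ s' := by
            obtain ⟨c1, _, _⟩ := stepA_char S rest extra (PySem.Set.add s1 r) s' out h
            exact (c1 r).mpr (Or.inl ((PySem.Set.mem_add s1 r r).mpr (Or.inr rfl)))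
          have hCrl : resid C rl = [] := by
            rw [hresC, hfil]
            exact resid_single_mem (hs' r hrs')
          simp only [assembleGo]
          rw [hCrl, if_neg (by simp), if_neg (by simp)]
          exact ih extra (PySem.Set.add s1 r) s' out h hS hs' hC b hb
      | cons r2 t =>
        simp only [stepA, hfil] at h
        cases hstep : stepA S rest extra s1 with
        | none => rw [hstep] at h; simp at h
        | some p =>
          rw [hstep] at h; simp at h
          obtain ⟨rfl, rfl⟩ := h
          have hCrl : resid C rl = resid C (r :: r2 :: t) := by rw [hresC, hfil]
          simp only [assembleGo]
          rw [hCrl]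
          split_ifs with h1 h2
          · exact congrArg (_ :: ·) (ih extra s1 p.1 p.2 hstep hS hs' hC b hb)
          · exact congrArg (_ :: ·)
              (ih extra s1 p.1 p.2 hstep hS hs' hC true (fun _ => rfl))
          · exact ih extra s1 p.1 p.2 hstep hS hs' hC b hb

-- a round does not change which rooms the next closure stage forces
theorem step_transfer (S : PySem.Set String) (l out : List (List String))
    (s' : PySem.Set String)
    (h : stepA S l false PySem.Set.empty = some (s', out)) (U : List String)
    (hSU : ∀ x, x ∈ S → x ∈ U) (hs'U : ∀ x, x ∈ s' → x ∈ U)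
    (hplus : ("+" : String) ∉ U) :
    ∀ r, r ∈ newB U out ↔ r ∈ newB U l := by
  obtain ⟨c1, c2, c3⟩ := stepA_char S l false PySem.Set.empty s' out h
  intro r
  rw [mem_newB, mem_newB]
  constructor
  · rintro ⟨hr, rl1, hm, hres⟩
    obtain ⟨_, rl, hml, rfl⟩ := c2 rl1 hm
    rw [resid_resid hSU rl] at hres
    exact ⟨hr, rl, hml, hres⟩
  · rintro ⟨hr, rl, hml, hres⟩
    rcases c3 rl hml with hin | ⟨r0, hres0⟩
    · refine ⟨hr, resid S rl, hin, ?_⟩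
      rw [resid_resid hSU rl]
      exact hres
    · exfalso
      have heq : resid U rl = resid U [r0] := by
        rw [← resid_resid hSU rl, hres0]
      by_cases hr0 : r0 = "+"
      · subst hr0
        rw [resid_single_plus hplus] at heq
        rw [heq] at hres
        simp at hres
        exact hr hres.symm
      · have hr0s : r0 ∈ s' := (c1 r0).mpr (Or.inr ⟨hr0, rl, hml, hres0⟩)
        rw [resid_single_mem (hs'U r0 hr0s)] at heq
        rw [heq] at hres
        simp at hres

-- synchronous stages of the closure, starting from S (proof-side mirror of pvStage)
def stageM (S : PySem.Set String) (rls : List (List String)) : Nat → PySem.Set String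
  | 0 => S
  | k + 1 => PySem.Set.union (stageM S rls k) (newB (stageM S rls k) rls)

-- crash-freedom of A's loop, relative to the current state
def genPre (S : PySem.Set String) (rls : List (List String)) : Prop :=
  (∀ rl ∈ rls, resid S rl ≠ []) ∧
  ∀ rl ∈ rls, ∀ k ≤ totalLen rls,
    ¬(2 ≤ (resid (stageM S rls k) rl).length ∧ resid (stageM S rls (k + 1)) rl = [])

theorem stage_sub (S : PySem.Set String) (rls : List (List String)) :
    ∀ k x, x ∈ S → x ∈ stageM S rls k := by
  intro k
  induction k with
  | zero => intro x hx; exact hx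
  | succ n ih =>
    intro x hx
    simp only [stageM]
    rw [PySem.Set.mem_union]
    exact Or.inl (ih x hx)

theorem stage_mono (S : PySem.Set String) (rls : List (List String)) :
    ∀ j k, j ≤ k → ∀ x, x ∈ stageM S rls j → x ∈ stageM S rls k := by
  intro j k hjk
  induction hjk with
  | refl => exact fun x hx => hx
  | step _ ih =>
    intro x hx
    simp only [stageM]
    rw [PySem.Set.mem_union]
    exact Or.inl (ih x hx)

theorem stage_plus (S : PySem.Set String) (rls : List (List String))
    (h : ("+" : String) ∉ S) : ∀ k, ("+" : String) ∉ stageM S rls k := by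
  intro k
  induction k with
  | zero => exact h
  | succ n ih =>
    simp only [stageM]
    rw [PySem.Set.mem_union]
    rintro (hc | hc)
    · exact ih hc
    · exact ((mem_newB _ rls _).mp hc).1 rfl

theorem plus_not_s' {S s' : PySem.Set String} {rls out : List (List String)}
    (h : stepA S rls false PySem.Set.empty = some (s', out)) :
    ("+" : String) ∉ s' := by
  obtain ⟨c1, _, _⟩ := stepA_char S rls false PySem.Set.empty s' out h
  intro hc
  rcases (c1 "+").mp hc with h0 | ⟨hne, _⟩
  · simp [PySem.Set.empty] at h0
  · exact hne rfl

theorem s'_newB {S s' : PySem.Set String} {rls out : List (List String)}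
    (h : stepA S rls false PySem.Set.empty = some (s', out)) :
    ∀ x, x ∈ s' ↔ x ∈ newB S rls := by
  obtain ⟨c1, _, _⟩ := stepA_char S rls false PySem.Set.empty s' out h
  intro x
  rw [c1 x, mem_newB]
  simp [PySem.Set.empty]

-- stages of the next state are the shifted stages of the current state
theorem stage_sync (S : PySem.Set String) (rls out : List (List String))
    (s' : PySem.Set String)
    (h : stepA S rls false PySem.Set.empty = some (s', out))
    (hplus : ("+" : String) ∉ S) :
    ∀ k x, x ∈ stageM (PySem.Set.update S s') out k ↔ x ∈ stageM S rls (k + 1) := by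
  intro k
  induction k with
  | zero =>
    intro x
    show x ∈ PySem.Set.update S s' ↔ x ∈ stageM S rls 1
    rw [PySem.Set.mem_update]
    simp only [stageM]
    rw [PySem.Set.mem_union]
    rw [s'_newB h x]
  | succ n ih =>
    intro x
    simp only [stageM]
    rw [PySem.Set.mem_union, PySem.Set.mem_union]
    have hnew : ∀ y, y ∈ newB (stageM (PySem.Set.update S s') out n) out ↔
        y ∈ newB (stageM S rls (n + 1)) rls := by
      intro y
      rw [newB_congr (fun z => ih z) out]
      refine step_transfer S rls out s' h (stageM S rls (n + 1)) ?_ ?_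
        (stage_plus S rls hplus (n + 1)) y
      · intro z hz
        exact stage_sub S rls (n + 1) z hz
      · intro z hz
        have h1 : z ∈ stageM S rls 1 := by
          simp only [stageM]
          rw [PySem.Set.mem_union]
          exact Or.inr ((s'_newB h z).mp hz)
        exact stage_mono S rls 1 (n + 1) (by omega) z h1
    constructor
    · rintro (hx | hx)
      · exact Or.inl ((ih x).mp hx)
      · exact Or.inr ((hnew x).mp hx)
    · rintro (hx | hx)
      · exact Or.inl ((ih x).mpr hx)
      · exact Or.inr ((hnew x).mpr hx)

theorem genPre_preserve (S : PySem.Set String) (rls out : List (List String))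
    (s' : PySem.Set String)
    (h : stepA S rls false PySem.Set.empty = some (s', out))
    (hplus : ("+" : String) ∉ S) (hgp : genPre S rls) (hne : out ≠ rls) :
    genPre (PySem.Set.update S s') out := by
  obtain ⟨c1, c2, c3⟩ := stepA_char S rls false PySem.Set.empty s' out h
  have hsync := stage_sync S rls out s' h hplus
  have hsize : totalLen out < totalLen rls :=
    ((stepA_size S rls false PySem.Set.empty s' out h).2).resolve_left hne
  have hSsub : ∀ x, x ∈ S → x ∈ PySem.Set.update S s' := by
    intro x hx
    rw [PySem.Set.mem_update]
    exact Or.inl hx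
  have hplus' : ("+" : String) ∉ PySem.Set.update S s' := by
    rw [PySem.Set.mem_update]
    rintro (hc | hc)
    · exact hplus hc
    · exact plus_not_s' h hc
  have hstage1 : ∀ rl : List String,
      resid (PySem.Set.update S s') (resid S rl) = resid (stageM S rls 1) rl := by
    intro rl
    rw [resid_resid hSsub rl]
    exact resid_congr (hsync 0) rl
  constructor
  · intro rl1 hm
    obtain ⟨hshape, rl, hml, rfl⟩ := c2 rl1 hm
    rcases hshape with hlen | hplusrl
    · have hj := hgp.2 rl hml 0 (Nat.zero_le _)
      rw [hstage1 rl]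
      intro hc
      exact hj ⟨by simpa [stageM] using hlen, hc⟩
    · rw [hplusrl, resid_single_plus hplus']
      simp
  · intro rl1 hm k hk
    obtain ⟨hshape, rl, hml, rfl⟩ := c2 rl1 hm
    rintro ⟨hA, hB⟩
    have hSsubk : ∀ j, ∀ x, x ∈ S → x ∈ stageM (PySem.Set.update S s') out j := by
      intro j x hx
      exact stage_sub _ out j x (hSsub x hx)
    have e1 : resid (stageM (PySem.Set.update S s') out k) (resid S rl) =
        resid (stageM S rls (k + 1)) rl := by
      rw [resid_resid (hSsubk k) rl]
      exact resid_congr (hsync k) rl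
    have e2 : resid (stageM (PySem.Set.update S s') out (k + 1)) (resid S rl) =
        resid (stageM S rls (k + 2)) rl := by
      rw [resid_resid (hSsubk (k + 1)) rl]
      exact resid_congr (hsync (k + 1)) rl
    rw [e1] at hA
    rw [e2] at hB
    exact hgp.2 rl hml (k + 1) (by unfold totalLen at *; omega) ⟨hA, hB⟩

theorem stepA_some_of (S : PySem.Set String) :
    ∀ (l : List (List String)) (extra : Bool) (s1 : PySem.Set String),
      (∀ rl ∈ l, resid S rl ≠ []) →
      ∃ p, stepA S l extra s1 = some p := by
  intro l
  induction l with
  | nil => intro extra s1 _; exact ⟨(s1, []), rfl⟩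
  | cons rl rest ih =>
    intro extra s1 h
    cases hfil : resid S rl with
    | nil => exact absurd hfil (h rl List.mem_cons_self)
    | cons r rs =>
      have hrest : ∀ rl' ∈ rest, resid S rl' ≠ [] :=
        fun rl' hm => h rl' (List.mem_cons_of_mem _ hm)
      cases rs with
      | nil =>
        by_cases hr : r = "+"
        · subst hr
          cases extra with
          | true =>
            obtain ⟨p, hp⟩ := ih true s1 hrest
            exact ⟨p, by simp only [stepA, hfil, if_pos]; exact hp⟩
          | false =>
            obtain ⟨p, hp⟩ := ih true s1 hrest
            refine ⟨(p.1, ["+"] :: p.2), ?_⟩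
            simp only [stepA, hfil, if_pos, Bool.false_eq_true, if_false, hp,
              Option.map_some]
        · obtain ⟨p, hp⟩ := ih extra (PySem.Set.add s1 r) hrest
          exact ⟨p, by simp only [stepA, hfil, if_neg hr]; exact hp⟩
      | cons r2 t =>
        obtain ⟨p, hp⟩ := ih extra s1 hrest
        refine ⟨(p.1, (r :: r2 :: t) :: p.2), ?_⟩
        simp only [stepA, hfil, hp, Option.map_some]

theorem loopA_some : ∀ (fuel : Nat) (rls : List (List String)) (S : PySem.Set String),
    totalLen rls < fuel → ("+" : String) ∉ S → genPre S rls →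
    (loopA fuel S rls).isSome := by
  intro fuel
  induction fuel with
  | zero => intro rls S h; omega
  | succ n ih =>
    intro rls S hf hplus hgp
    obtain ⟨⟨s', out⟩, hstep⟩ := stepA_some_of S rls false PySem.Set.empty hgp.1
    simp only [loopA, hstep]
    by_cases heq : out = rls
    · rw [if_pos heq]
      simp
    · rw [if_neg heq]
      have hsize : totalLen out < totalLen rls :=
        ((stepA_size S rls false PySem.Set.empty s' out hstep).2).resolve_left heq
      apply ih out (PySem.Set.update S s') (by omega)
      · rw [PySem.Set.mem_update]
        rintro (hc | hc)
        · exact hplus hc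
        · exact plus_not_s' hstep hc
      · exact genPre_preserve S rls out s' hstep hplus hgp heq

theorem loopA_eq : ∀ (fuel : Nat) (rls : List (List String)) (S : PySem.Set String)
    (out : List (List String)),
    ("+" : String) ∉ S → S.Nodup →
    loopA fuel S rls = some out →
    out = assembleB (closureB (rls.flatten.length + 1) S rls) rls := by
  intro fuel
  induction fuel with
  | zero => intro rls S out _ _ h; simp [loopA] at h
  | succ n ih =>
    intro rls S out hplus hnd h
    simp only [loopA] at h
    cases hstep : stepA S rls false PySem.Set.empty with
    | none => rw [hstep] at h; simp at h
    | some p =>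
      obtain ⟨s', rls1⟩ := p
      rw [hstep] at h
      dsimp only at h
      by_cases heq : rls1 = rls
      · subst heq
        rw [if_pos rfl] at h
        obtain ⟨f1, f2, f3⟩ := stepA_fix S rls1 false PySem.Set.empty s' hstep
        have hnB : newB S rls1 = [] := newB_eq_nil S rls1 f2
        have hcl : closureB (rls1.flatten.length + 1) S rls1 = S := by
          simp only [closureB]
          rw [if_pos hnB]
        simp only [Option.some.injEq] at h
        rw [← h, hcl]
        unfold assembleB
        rw [f3]
      · rw [if_neg heq] at h
        have hplus' : ("+" : String) ∉ PySem.Set.update S s' := by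
          rw [PySem.Set.mem_update]
          rintro (hc | hc)
          · exact hplus hc
          · exact plus_not_s' hstep hc
        have hnd' : (PySem.Set.update S s').Nodup := PySem.Set.nodup_update S s' hnd
        have hout := ih rls1 (PySem.Set.update S s') out hplus' hnd' h
        have htrans : ∀ U : List String, (∀ x, x ∈ S → x ∈ U) → (∀ x, x ∈ s' → x ∈ U) →
            ("+" : String) ∉ U → ∀ r, r ∈ newB U rls1 ↔ r ∈ newB U rls :=
          fun U h1 h2 h3 => step_transfer S rls rls1 s' hstep U h1 h2 h3
        have hs'new := s'_newB hstep
        have hCC : ∀ x, x ∈ closureB (rls.flatten.length + 1) S rls ↔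
            x ∈ closureB (rls1.flatten.length + 1) (PySem.Set.update S s') rls1 := by
          by_cases hnB : newB S rls = []
          · have hs'e : ∀ x, x ∈ s' → False := by
              intro x hx
              have := (hs'new x).mp hx
              rw [hnB] at this
              simp at this
            have hTT' : ∀ x, x ∈ S ↔ x ∈ PySem.Set.update S s' := by
              intro x
              rw [PySem.Set.mem_update]
              exact ⟨Or.inl, fun hx => hx.resolve_right (hs'e x)⟩
            exact closure_congr (rls.flatten.length + 1) S (PySem.Set.update S s')
              rls rls1 (rls1.flatten.length + 1) (measure_le S rls) (measure_le _ rls1)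
              hTT' hplus
              (fun U hU hUp => htrans U hU (fun x hx => absurd hx (hs'e x)) hUp)
          · have hstep1 : closureB (rls.flatten.length + 1) S rls =
                closureB rls.flatten.length (PySem.Set.union S (newB S rls)) rls := by
              simp only [closureB]
              rw [if_neg hnB]
            intro x
            rw [hstep1]
            have hTT' : ∀ y, y ∈ PySem.Set.union S (newB S rls) ↔
                y ∈ PySem.Set.update S s' := by
              intro y
              rw [PySem.Set.mem_union, PySem.Set.mem_update, hs'new y]
            have hplusU : ("+" : String) ∉ PySem.Set.union S (newB S rls) := by
              rw [PySem.Set.mem_union]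
              rintro (hc | hc)
              · exact hplus hc
              · exact ((mem_newB S rls _).mp hc).1 rfl
            have hm1 : (rls.flatten.filter (fun r =>
                !(PySem.Set.contains (PySem.Set.union S (newB S rls)) r))).length <
                rls.flatten.length := by
              obtain ⟨r, hr⟩ := List.exists_mem_of_ne_nil _ hnB
              obtain ⟨hrp, rl, hrl, hres⟩ := (mem_newB S rls r).mp hr
              have hrres : r ∈ resid S rl := by rw [hres]; exact List.mem_cons_self
              rw [mem_resid] at hrres
              have hfl : (rls.flatten.filter
                  (fun r => !(PySem.Set.contains S r))).length ≤ rls.flatten.length :=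
                List.length_filter_le _ _
              have := length_filter_lt rls.flatten S (PySem.Set.union S (newB S rls))
                (fun y hy => by rw [PySem.Set.mem_union]; exact Or.inl hy)
                r (List.mem_flatten.mpr ⟨rl, hrl, hrres.1⟩) hrres.2
                (by rw [PySem.Set.mem_union]; exact Or.inr hr)
              omega
            exact closure_congr rls.flatten.length (PySem.Set.union S (newB S rls))
              (PySem.Set.update S s') rls rls1 (rls1.flatten.length + 1) hm1
              (measure_le _ rls1) hTT' hplusU
              (fun U hU hUp => htrans U
                (fun y hy => hU y (by rw [PySem.Set.mem_union]; exact Or.inl hy))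
                (fun y hy => hU y
                  (by rw [PySem.Set.mem_union]; exact Or.inr ((hs'new y).mp hy)))
                hUp) x
        set C := closureB (rls.flatten.length + 1) S rls with hCdef
        set C' := closureB (rls1.flatten.length + 1) (PySem.Set.update S s') rls1 with hC'def
        have hCplus : ("+" : String) ∉ C := closure_plus_free _ S rls hplus
        have hCnd : C.Nodup := closure_nodup _ S rls hnd
        have hC'nd : C'.Nodup := closure_nodup _ _ rls1 hnd'
        have hSC : ∀ x, x ∈ S → x ∈ C := fun x hx => closure_sub _ S rls x hx
        have hs'C : ∀ x, x ∈ s' → x ∈ C := by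
          intro x hx
          exact closure_new_sub rls.flatten.length S rls x ((hs'new x).mp hx)
        have hasm1 : assembleGo C rls false = assembleGo C rls1 false :=
          step_assemble S C rls false PySem.Set.empty s' rls1 hstep hSC hs'C hCplus
            false (fun hh => hh)
        have hasm2 : assembleGo C rls1 false = assembleGo C' rls1 false :=
          assembleGo_congr hCC rls1 false
        have hsorted : PySem.List.sorted C (fun s : String => s) false =
            PySem.List.sorted C' (fun s : String => s) false :=
          sorted_eq_mem C C' hCC hCnd hC'nd
        rw [hout]
        unfold assembleB
        rw [hsorted, hasm1, hasm2]

theorem pvResid_eq_resid (T rl : List String) : pvResid T rl = resid T rl := by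
  unfold pvResid resid
  apply List.filter_congr
  intro r _
  by_cases hr : r ∈ T <;> simp [hr]

theorem mem_pvForced (rls : List (List String)) (T : List String) (x : String) :
    x ∈ pvForced rls T ↔ x ≠ "+" ∧ ∃ rl ∈ rls, pvResid T rl = [x] := by
  unfold pvForced
  rw [List.mem_filterMap]
  constructor
  · rintro ⟨rl, hm, hf⟩
    cases hfil : pvResid T rl with
    | nil => rw [hfil] at hf; simp at hf
    | cons r rs =>
      cases rs with
      | nil =>
        rw [hfil] at hf
        by_cases hr : r = "+"
        · simp [hr] at hf
        · simp [hr] at hf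
          subst hf
          exact ⟨hr, rl, hm, hfil⟩
      | cons r2 t => rw [hfil] at hf; simp at hf
  · rintro ⟨hx, rl, hm, hres⟩
    refine ⟨rl, hm, ?_⟩
    rw [hres]
    simp [hx]

theorem pv_stage_bridge (rls : List (List String)) :
    ∀ k x, x ∈ pvStage rls k ↔ x ∈ stageM PySem.Set.empty rls k := by
  intro k
  induction k with
  | zero => intro x; simp [pvStage, stageM, PySem.Set.empty]
  | succ n ih =>
    intro x
    simp only [pvStage, stageM, List.mem_append]
    rw [PySem.Set.mem_union]
    have hres : ∀ rl, pvResid (pvStage rls n) rl =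
        resid (stageM PySem.Set.empty rls n) rl := by
      intro rl
      rw [pvResid_eq_resid]
      exact resid_congr (fun y => ih y) rl
    constructor
    · rintro (hx | hx)
      · exact Or.inl ((ih x).mp hx)
      · obtain ⟨hxp, rl, hm, hr⟩ := (mem_pvForced rls _ x).mp hx
        refine Or.inr ((mem_newB _ rls x).mpr ⟨hxp, rl, hm, ?_⟩)
        rw [← hres rl]
        exact hr
    · rintro (hx | hx)
      · exact Or.inl ((ih x).mpr hx)
      · obtain ⟨hxp, rl, hm, hr⟩ := (mem_newB _ rls x).mp hx
        refine Or.inr ((mem_pvForced rls _ x).mpr ⟨hxp, rl, hm, ?_⟩)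
        rw [hres rl]
        exact hr

theorem pre_genPre (rls : List (List String))
    (hpre : Pre_simplify_room_lists rls) : genPre PySem.Set.empty rls := by
  obtain ⟨h1, h2⟩ := hpre
  constructor
  · intro rl hm
    rw [resid_empty]
    exact h1 rl hm
  · intro rl hm k hk
    rintro ⟨hA, hB⟩
    have e : ∀ j, pvResid (pvStage rls j) rl = resid (stageM PySem.Set.empty rls j) rl := by
      intro j
      rw [pvResid_eq_resid]
      exact resid_congr (fun y => pv_stage_bridge rls j y) rl
    refine h2 rl hm k hk ⟨?_, ?_⟩
    · rw [e k]
      exact hA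
    · rw [e (k + 1)]
      exact hB

-- ===== VERDICT =====

theorem simplify_room_lists_spec : Claim_equal_simplify_room_lists := by
  unfold Claim_equal_simplify_room_lists
  intro rls hdom hpre
  unfold Spec_simplify_room_lists
  have hgp : genPre PySem.Set.empty rls := pre_genPre rls hpre
  have hplus : ("+" : String) ∉ PySem.Set.empty := by simp [PySem.Set.empty]
  have hsome := loopA_some (totalLen rls + 1) rls PySem.Set.empty (by omega) hplus hgp
  obtain ⟨out, hout⟩ := Option.isSome_iff_exists.mp hsome
  have heq := loopA_eq (totalLen rls + 1) rls PySem.Set.empty out hplus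
    (by simp [PySem.Set.empty]) hout
  unfold simplify_room_lists
  rw [hout, Option.getD_some, heq]
  rfl
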